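-- pv_equiv track=rewrite | github.com/GodfreyHardy/PythonProject | dk69.py | generate
-- ===== SOURCE A (Python) =====
-- def generate(lt,sign,res,begin,s):
--     if begin == 7:
--         res.append(s)
--     for i in range(4):
--         if sign[i] == 0:
--             sign[i] = 1
--             if begin==0 or begin==2 or begin==4:
--                 for j in range(4):
--                     if j==0:
--                         generate(lt,sign,res,begin+2,s+str(lt[i])+'+')
--                     elif j==1:
--                         generate(lt, sign, res, begin + 2, s + str(lt[i]) + '-')
--                     elif j==2:
--                         generate(lt, sign, res, begin + 2, s + str(lt[i]) + '*')
--                     elif j==3: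
--                         generate(lt, sign, res, begin + 2, s + str(lt[i]) + '//')
--             elif begin==6:
--                 generate(lt,sign,res,begin+1,s+str(lt[i]))
--             sign[i] = 0
--     return res
-- ===== SOURCE B (Python) =====
-- def generate(lt, sign, res, begin, s):
--     # Explicit stack (worklist) DFS instead of A's recursion; same final appends
--     # to res. sign is never mutated (A restores it anyway); res is extended in
--     # place exactly as A does.
--     avail0 = tuple(sign[i] == 0 for i in range(4))
--     stack = [(begin, s, avail0)]
--     while stack:
--         b, cur, avail = stack.pop()
--         if b == 7:
--             res.append(cur)
--         if b in (0, 2, 4):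
--             children = [(b + 2, cur + str(lt[i]) + op, avail[:i] + (False,) + avail[i + 1:])
--                         for i, a in enumerate(avail) if a
--                         for op in ('+', '-', '*', '//')]
--         elif b == 6:
--             children = [(b + 1, cur + str(lt[i]), avail[:i] + (False,) + avail[i + 1:])
--                         for i, a in enumerate(avail) if a]
--         else:
--             children = []
--         stack.extend(reversed(children))
--     return res
-- ===== Notes on version B (the rewrite author's own statement) =====
-- stated objective: alternative
-- what changed: A's recursive DFS (with in-place sign toggling and an unrolled 4-way operator dispatch loop) is replaced by an iterative explicit-stack worklist over immutable (begin, prefix, availability) states, pushing children in reverse so LIFO popping reproduces A's append order.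
import Mathlib
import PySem

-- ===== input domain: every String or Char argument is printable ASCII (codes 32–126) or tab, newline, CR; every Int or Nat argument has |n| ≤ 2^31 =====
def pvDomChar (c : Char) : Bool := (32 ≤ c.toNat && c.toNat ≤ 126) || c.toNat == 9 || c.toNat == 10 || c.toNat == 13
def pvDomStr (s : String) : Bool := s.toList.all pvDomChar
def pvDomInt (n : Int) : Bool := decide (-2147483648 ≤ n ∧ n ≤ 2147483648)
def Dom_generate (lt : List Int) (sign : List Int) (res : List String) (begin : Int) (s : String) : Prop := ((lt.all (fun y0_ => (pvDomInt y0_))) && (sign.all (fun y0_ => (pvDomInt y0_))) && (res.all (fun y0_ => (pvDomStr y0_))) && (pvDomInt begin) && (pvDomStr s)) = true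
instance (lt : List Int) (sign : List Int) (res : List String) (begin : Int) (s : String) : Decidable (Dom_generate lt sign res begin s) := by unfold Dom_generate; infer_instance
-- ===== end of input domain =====

-- B replaces A's recursive DFS (mutating sign in place) by an explicit-stack
-- worklist loop over immutable states; equal return value. Note: A and B both
-- extend res in place in Python (same appends); the theorems are about the
-- returned list.

-- ===== PORT A =====
-- Literal port of A. Python mutates sign (sign[i]=1 … sign[i]=0) and res in
-- place; the port threads their values: each recursive call receives
-- sign.set i 1 (the restore makes the net effect on sign nil) and the current
-- res. The 'for i in range(4)' loop (4 fixed iterations) is unrolled into the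
-- four identical blocks below, and the 'for j in range(4)' if/elif dispatch is
-- exactly its four sequential recursive calls. sign[i] / lt[i] are
-- PySem.List.pyGetD (Pre_generate excludes the inputs where Python raises
-- IndexError, so the defaults are never the value used). The fuel parameter is
-- only a structural totality guard: recursion happens only for begin in
-- {0,2,4,6} and each call raises begin, so the depth is at most 5 and the
-- fuel-0 branch is never reached from generate's fuel of 8.
def generateF (fuel : Nat) (lt : List Int) (sign : List Int) (res : List String) (begin : Int) (s : String) : List String :=
  match fuel with
  | 0 => res
  | fuel + 1 =>
    let res0 := if begin = 7 then res ++ [s] else res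
    -- i = 0
    let res1 :=
      if PySem.List.pyGetD sign 0 1 = 0 then
        let sg := sign.set 0 1
        let ns := PySem.Int.toStr (PySem.List.pyGetD lt 0 0)
        if begin = 0 ∨ begin = 2 ∨ begin = 4 then
          generateF fuel lt sg (generateF fuel lt sg (generateF fuel lt sg (generateF fuel lt sg res0 (begin+2) (s ++ ns ++ "+")) (begin+2) (s ++ ns ++ "-")) (begin+2) (s ++ ns ++ "*")) (begin+2) (s ++ ns ++ "//")
        else if begin = 6 then
          generateF fuel lt sg res0 (begin+1) (s ++ ns)
        else res0
      else res0
    -- i = 1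
    let res2 :=
      if PySem.List.pyGetD sign 1 1 = 0 then
        let sg := sign.set 1 1
        let ns := PySem.Int.toStr (PySem.List.pyGetD lt 1 0)
        if begin = 0 ∨ begin = 2 ∨ begin = 4 then
          generateF fuel lt sg (generateF fuel lt sg (generateF fuel lt sg (generateF fuel lt sg res1 (begin+2) (s ++ ns ++ "+")) (begin+2) (s ++ ns ++ "-")) (begin+2) (s ++ ns ++ "*")) (begin+2) (s ++ ns ++ "//")
        else if begin = 6 then
          generateF fuel lt sg res1 (begin+1) (s ++ ns)
        else res1
      else res1
    -- i = 2
    let res3 :=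
      if PySem.List.pyGetD sign 2 1 = 0 then
        let sg := sign.set 2 1
        let ns := PySem.Int.toStr (PySem.List.pyGetD lt 2 0)
        if begin = 0 ∨ begin = 2 ∨ begin = 4 then
          generateF fuel lt sg (generateF fuel lt sg (generateF fuel lt sg (generateF fuel lt sg res2 (begin+2) (s ++ ns ++ "+")) (begin+2) (s ++ ns ++ "-")) (begin+2) (s ++ ns ++ "*")) (begin+2) (s ++ ns ++ "//")
        else if begin = 6 then
          generateF fuel lt sg res2 (begin+1) (s ++ ns)
        else res2
      else res2
    -- i = 3
    if PySem.List.pyGetD sign 3 1 = 0 then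
      let sg := sign.set 3 1
      let ns := PySem.Int.toStr (PySem.List.pyGetD lt 3 0)
      if begin = 0 ∨ begin = 2 ∨ begin = 4 then
        generateF fuel lt sg (generateF fuel lt sg (generateF fuel lt sg (generateF fuel lt sg res3 (begin+2) (s ++ ns ++ "+")) (begin+2) (s ++ ns ++ "-")) (begin+2) (s ++ ns ++ "*")) (begin+2) (s ++ ns ++ "//")
      else if begin = 6 then
        generateF fuel lt sg res3 (begin+1) (s ++ ns)
      else res3
    else res3

def generate (lt : List Int) (sign : List Int) (res : List String) (begin : Int) (s : String) : List String :=
  generateF 8 lt sign res begin s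

-- ===== PORT B =====
-- B's children list comprehensions ('avail[:i] + (False,) + avail[i+1:]' is
-- List.set at i, valid for every i produced by enumerate).
def childStates (lt : List Int) (b : Int) (cur : String) (avail : List Bool) : List (Int × String × List Bool) :=
  if b = 0 ∨ b = 2 ∨ b = 4 then
    (PySem.List.enumerate avail).flatMap (fun p =>
      if p.2 then
        (["+", "-", "*", "//"] : List String).map (fun op =>
          (b + 2, cur ++ PySem.Int.toStr (PySem.List.pyGetD lt p.1 0) ++ op, avail.set p.1.toNat false))
      else [])
  else if b = 6 then
    (PySem.List.enumerate avail).flatMap (fun p =>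
      if p.2 then [(b + 1, cur ++ PySem.Int.toStr (PySem.List.pyGetD lt p.1 0), avail.set p.1.toNat false)] else [])
  else []

-- termination weight of one stack state / of a stack (head = Python's top)
def pvW (avail : List Bool) (b : Int) : Nat := (4 * avail.length + 1) ^ ((8 - b).toNat)
def pvWsum (st : List (Int × String × List Bool)) : Nat := (st.map (fun p => pvW p.2.2 p.1)).sum

theorem pvFlatMap_len_le (avail : List Bool) (f : Int × Bool → List (Int × String × List Bool))
    (c : Nat) (hf : ∀ p, (f p).length ≤ c) :
    ((PySem.List.enumerate avail).flatMap f).length ≤ c * avail.length := by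
  rw [List.length_flatMap]
  calc ((PySem.List.enumerate avail).map (fun p => (f p).length)).sum
      ≤ ((PySem.List.enumerate avail).map (fun p => (f p).length)).length • c :=
        List.sum_le_card_nsmul _ _ (by
          intro x hx
          simp only [List.mem_map] at hx
          obtain ⟨p, _, rfl⟩ := hx
          exact hf p)
    _ ≤ c * avail.length := by
        rw [smul_eq_mul, List.length_map, PySem.List.length_enumerate, Nat.mul_comm]

theorem pvWsum_child_lt (lt : List Int) (b : Int) (cur : String) (avail : List Bool) :
    pvWsum (childStates lt b cur avail) < pvW avail b := by
  have hlen : (childStates lt b cur avail).length ≤ 4 * avail.length := by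
    unfold childStates
    split_ifs with h1 h2
    · exact pvFlatMap_len_le avail _ 4 (by intro p; split <;> simp)
    · exact le_trans (pvFlatMap_len_le avail _ 1 (by intro p; split <;> simp)) (by omega)
    · simp
  have hmem : ∀ p ∈ childStates lt b cur avail,
      pvW p.2.2 p.1 ≤ (4 * avail.length + 1) ^ ((8 - b).toNat - 1) := by
    intro p hp
    unfold childStates at hp
    split_ifs at hp with h1 h2
    · simp only [List.mem_flatMap] at hp
      obtain ⟨q, _, hq⟩ := hp
      split at hq
      · simp only [List.mem_map] at hq
        obtain ⟨op, _, rfl⟩ := hq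
        simp only [pvW, List.length_set]
        apply Nat.pow_le_pow_right (by omega)
        rcases h1 with h | h | h <;> subst h <;> simp
      · simp at hq
    · simp only [List.mem_flatMap] at hp
      obtain ⟨q, _, hq⟩ := hp
      split at hq
      · simp only [List.mem_singleton] at hq
        subst hq
        simp only [pvW, List.length_set]
        apply Nat.pow_le_pow_right (by omega)
        subst h2; simp
      · simp at hq
    · simp at hp
  have hsum : pvWsum (childStates lt b cur avail)
      ≤ (childStates lt b cur avail).length * ((4 * avail.length + 1) ^ ((8 - b).toNat - 1)) := by
    unfold pvWsum
    have := List.sum_le_card_nsmul ((childStates lt b cur avail).map (fun p => pvW p.2.2 p.1))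
      ((4 * avail.length + 1) ^ ((8 - b).toNat - 1))
      (by intro x hx; simp only [List.mem_map] at hx; obtain ⟨p, hp, rfl⟩ := hx; exact hmem p hp)
    simpa using this
  by_cases hb : b = 0 ∨ b = 2 ∨ b = 4 ∨ b = 6
  · have he : 1 ≤ (8 - b).toNat := by rcases hb with h|h|h|h <;> subst h <;> decide
    have hB : 4 * avail.length < 4 * avail.length + 1 := by omega
    calc pvWsum (childStates lt b cur avail)
        ≤ (4 * avail.length) * ((4 * avail.length + 1) ^ ((8 - b).toNat - 1)) :=
          le_trans hsum (Nat.mul_le_mul_right _ hlen)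
      _ < (4 * avail.length + 1) * ((4 * avail.length + 1) ^ ((8 - b).toNat - 1)) := by
          apply Nat.mul_lt_mul_of_lt_of_le hB (le_refl _)
          positivity
      _ = (4 * avail.length + 1) ^ ((8 - b).toNat - 1 + 1) := by ring
      _ = pvW avail b := by unfold pvW; congr 1; omega
  · have hemp : childStates lt b cur avail = [] := by
      unfold childStates
      rw [if_neg (by tauto), if_neg (by tauto)]
    rw [hemp]
    have h0 : pvWsum ([] : List (Int × String × List Bool)) = 0 := rfl
    rw [h0]
    unfold pvW
    positivity

-- termination of the worklist loop (cited by name from runStack's decreasing_by)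
theorem pvRunDec (lt : List Int) (b : Int) (cur : String) (avail : List Bool)
    (rest : List (Int × String × List Bool)) :
    pvWsum (childStates lt b cur avail ++ rest) < pvWsum ((b, cur, avail) :: rest) := by
  have h := pvWsum_child_lt lt b cur avail
  simp only [pvWsum, List.map_append, List.sum_append, List.map_cons, List.sum_cons] at *
  omega

-- the worklist loop ('while stack: pop; maybe append; extend(reversed(children))';
-- head of the Lean list = Python's stack top, so the extend is 'children ++ rest')
def runStack (lt : List Int) (st : List (Int × String × List Bool)) (out : List String) : List String :=
  match st with
  | [] => out
  | (b, cur, avail) :: rest =>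
    runStack lt (childStates lt b cur avail ++ rest) (if b = 7 then out ++ [cur] else out)
termination_by pvWsum st
decreasing_by exact pvRunDec lt b cur avail rest

-- 'tuple(sign[i] == 0 for i in range(4))': sign[i] is pyGetD (Pre_generate
-- excludes the short-sign inputs on which Python raises IndexError here).
def generate_alt (lt : List Int) (sign : List Int) (res : List String) (begin : Int) (s : String) : List String :=
  runStack lt [(begin, s, (PySem.List.pyRange 0 4 1).map (fun i => PySem.List.pyGetD sign i 1 == 0))] res

-- ===== PRECONDITION & SPEC =====
-- Pre_generate excludes exactly the inputs on which Python A raises IndexError: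
-- sign must have the four entries A unconditionally reads, and when begin is
-- 0/2/4/6 every still-available index (sign[i] == 0) must exist in lt.
def Pre_generate (lt : List Int) (sign : List Int) (res : List String) (begin : Int) (s : String) : Prop :=
  4 ≤ sign.length ∧
  ((begin = 0 ∨ begin = 2 ∨ begin = 4 ∨ begin = 6) →
    ∀ i < 4, sign.getD i 1 = 0 → i < lt.length)
instance (lt : List Int) (sign : List Int) (res : List String) (begin : Int) (s : String) : Decidable (Pre_generate lt sign res begin s) := by unfold Pre_generate; infer_instance

def pvWitness_generate : List Int × List Int × List String × Int × String :=
  ([1, 2, 3, 4], [0, 0, 0, 0], [], 6, "1+2*3-")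

def Spec_generate (lt : List Int) (sign : List Int) (res : List String) (begin : Int) (s : String) (out : List String) : Prop := out = generate_alt lt sign res begin s
instance (lt : List Int) (sign : List Int) (res : List String) (begin : Int) (s : String) (out : List String) : Decidable (Spec_generate lt sign res begin s out) := by unfold Spec_generate; infer_instance

-- ===== CLAIM (what is proved, stated in full; the proofs are below) =====
def Claim_equal_generate : Prop := ∀ (lt : List Int) (sign : List Int) (res : List String) (begin : Int) (s : String), Dom_generate lt sign res begin s → Pre_generate lt sign res begin s → Spec_generate lt sign res begin s (generate lt sign res begin s)

-- ===== LEMMAS AND PROOFS =====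

theorem runStack_nil (lt : List Int) (out : List String) : runStack lt [] out = out := by
  simp [runStack]

theorem runStack_step (lt : List Int) (b : Int) (cur : String) (avail : List Bool)
    (t : List (Int × String × List Bool)) (out : List String) :
    runStack lt ((b, cur, avail) :: t) out =
      runStack lt (childStates lt b cur avail ++ t) (if b = 7 then out ++ [cur] else out) := by
  simp [runStack]

theorem pvWsum_append (st1 st2 : List (Int × String × List Bool)) :
    pvWsum (st1 ++ st2) = pvWsum st1 + pvWsum st2 := by
  simp [pvWsum]

theorem pvWsum_cons (b : Int) (cur : String) (avail : List Bool)
    (t : List (Int × String × List Bool)) :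
    pvWsum ((b, cur, avail) :: t) = pvW avail b + pvWsum t := by
  simp [pvWsum]

theorem runStack_append_aux (lt : List Int) : ∀ (n : Nat) (st1 st2 : List (Int × String × List Bool)) (out : List String),
    pvWsum st1 ≤ n →
    runStack lt (st1 ++ st2) out = runStack lt st2 (runStack lt st1 out) := by
  intro n
  induction n using Nat.strong_induction_on with
  | _ n IH =>
    intro st1 st2 out hle
    rcases st1 with _ | ⟨⟨b, cur, avail⟩, t⟩
    · simp [runStack_nil]
    · have hlt : pvWsum (childStates lt b cur avail ++ t) < pvWsum ((b, cur, avail) :: t) := by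
        have h := pvWsum_child_lt lt b cur avail
        rw [pvWsum_append, pvWsum_cons]
        omega
      rw [List.cons_append, runStack_step, ← List.append_assoc]
      rw [IH (pvWsum (childStates lt b cur avail ++ t)) (lt_of_lt_of_le hlt hle) _ st2 _ (le_refl _)]
      rw [runStack_step]

theorem runStack_append (lt : List Int) (st1 st2 : List (Int × String × List Bool)) (out : List String) :
    runStack lt (st1 ++ st2) out = runStack lt st2 (runStack lt st1 out) :=
  runStack_append_aux lt (pvWsum st1) st1 st2 out (le_refl _)

theorem runStack_cons2 (lt : List Int) (x y : Int × String × List Bool)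
    (t : List (Int × String × List Bool)) (out : List String) :
    runStack lt (x :: y :: t) out = runStack lt (y :: t) (runStack lt [x] out) := by
  have h := runStack_append lt [x] (y :: t) out
  simpa using h

theorem runStack_ite (lt : List Int) (c : Prop) [Decidable c]
    (A B : List (Int × String × List Bool)) (out : List String) :
    runStack lt (if c then A else B) out = if c then runStack lt A out else runStack lt B out := by
  split <;> rfl

theorem childStates_024 (lt : List Int) (b : Int) (hb : b = 0 ∨ b = 2 ∨ b = 4)
    (cur : String) (a0 a1 a2 a3 : Bool) :
    childStates lt b cur [a0, a1, a2, a3] =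
      (if a0 = true then
        [(b + 2, cur ++ PySem.Int.toStr (PySem.List.pyGetD lt 0 0) ++ "+", [false, a1, a2, a3]),
         (b + 2, cur ++ PySem.Int.toStr (PySem.List.pyGetD lt 0 0) ++ "-", [false, a1, a2, a3]),
         (b + 2, cur ++ PySem.Int.toStr (PySem.List.pyGetD lt 0 0) ++ "*", [false, a1, a2, a3]),
         (b + 2, cur ++ PySem.Int.toStr (PySem.List.pyGetD lt 0 0) ++ "//", [false, a1, a2, a3])]
       else []) ++
      ((if a1 = true then
        [(b + 2, cur ++ PySem.Int.toStr (PySem.List.pyGetD lt 1 0) ++ "+", [a0, false, a2, a3]),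
         (b + 2, cur ++ PySem.Int.toStr (PySem.List.pyGetD lt 1 0) ++ "-", [a0, false, a2, a3]),
         (b + 2, cur ++ PySem.Int.toStr (PySem.List.pyGetD lt 1 0) ++ "*", [a0, false, a2, a3]),
         (b + 2, cur ++ PySem.Int.toStr (PySem.List.pyGetD lt 1 0) ++ "//", [a0, false, a2, a3])]
       else []) ++
      ((if a2 = true then
        [(b + 2, cur ++ PySem.Int.toStr (PySem.List.pyGetD lt 2 0) ++ "+", [a0, a1, false, a3]),
         (b + 2, cur ++ PySem.Int.toStr (PySem.List.pyGetD lt 2 0) ++ "-", [a0, a1, false, a3]),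
         (b + 2, cur ++ PySem.Int.toStr (PySem.List.pyGetD lt 2 0) ++ "*", [a0, a1, false, a3]),
         (b + 2, cur ++ PySem.Int.toStr (PySem.List.pyGetD lt 2 0) ++ "//", [a0, a1, false, a3])]
       else []) ++
      ((if a3 = true then
        [(b + 2, cur ++ PySem.Int.toStr (PySem.List.pyGetD lt 3 0) ++ "+", [a0, a1, a2, false]),
         (b + 2, cur ++ PySem.Int.toStr (PySem.List.pyGetD lt 3 0) ++ "-", [a0, a1, a2, false]),
         (b + 2, cur ++ PySem.Int.toStr (PySem.List.pyGetD lt 3 0) ++ "*", [a0, a1, a2, false]),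
         (b + 2, cur ++ PySem.Int.toStr (PySem.List.pyGetD lt 3 0) ++ "//", [a0, a1, a2, false])]
       else []) ++ []))) := by
  unfold childStates
  rw [if_pos hb]
  rfl

theorem childStates_6 (lt : List Int) (cur : String) (a0 a1 a2 a3 : Bool) :
    childStates lt 6 cur [a0, a1, a2, a3] =
      (if a0 = true then [((6:Int) + 1, cur ++ PySem.Int.toStr (PySem.List.pyGetD lt 0 0), [false, a1, a2, a3])] else []) ++
      ((if a1 = true then [((6:Int) + 1, cur ++ PySem.Int.toStr (PySem.List.pyGetD lt 1 0), [a0, false, a2, a3])] else []) ++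
      ((if a2 = true then [((6:Int) + 1, cur ++ PySem.Int.toStr (PySem.List.pyGetD lt 2 0), [a0, a1, false, a3])] else []) ++
      ((if a3 = true then [((6:Int) + 1, cur ++ PySem.Int.toStr (PySem.List.pyGetD lt 3 0), [a0, a1, a2, false])] else []) ++ []))) := by
  unfold childStates
  rw [if_neg (by decide), if_pos rfl]
  rfl

theorem childStates_other (lt : List Int) (b : Int) (h1 : ¬(b = 0 ∨ b = 2 ∨ b = 4)) (h2 : ¬ b = 6)
    (cur : String) (avail : List Bool) :
    childStates lt b cur avail = [] := by
  unfold childStates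
  rw [if_neg h1, if_neg h2]

theorem pyGetD_cons4_0 (s0 s1 s2 s3 : Int) (rest : List Int) :
    PySem.List.pyGetD (s0 :: s1 :: s2 :: s3 :: rest) 0 1 = s0 := by
  simp [pysem]

theorem pyGetD_cons4_1 (s0 s1 s2 s3 : Int) (rest : List Int) :
    PySem.List.pyGetD (s0 :: s1 :: s2 :: s3 :: rest) 1 1 = s1 := by
  simp [pysem]

theorem pyGetD_cons4_2 (s0 s1 s2 s3 : Int) (rest : List Int) :
    PySem.List.pyGetD (s0 :: s1 :: s2 :: s3 :: rest) 2 1 = s2 := by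
  simp [pysem]

theorem pyGetD_cons4_3 (s0 s1 s2 s3 : Int) (rest : List Int) :
    PySem.List.pyGetD (s0 :: s1 :: s2 :: s3 :: rest) 3 1 = s3 := by
  simp [pysem]

theorem avail_range4 (s0 s1 s2 s3 : Int) (rest : List Int) :
    (PySem.List.pyRange 0 4 1).map (fun i => PySem.List.pyGetD (s0 :: s1 :: s2 :: s3 :: rest) i 1 == 0)
      = [s0 == 0, s1 == 0, s2 == 0, s3 == 0] := by
  have hr : PySem.List.pyRange 0 4 1 = [0, 1, 2, 3] := by decide
  rw [hr]
  simp only [List.map_cons, List.map_nil,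
    pyGetD_cons4_0, pyGetD_cons4_1, pyGetD_cons4_2, pyGetD_cons4_3]

theorem main_eq (lt : List Int) : ∀ (fuel : Nat) (begin : Int),
    (if begin = 0 ∨ begin = 2 ∨ begin = 4 ∨ begin = 6 then (7 - begin).toNat else 0) < fuel →
    ∀ (sign : List Int) (s : String) (res : List String), 4 ≤ sign.length →
    generateF fuel lt sign res begin s =
      runStack lt [(begin, s, (sign.take 4).map (fun x => x == 0))] res := by
  intro fuel
  induction fuel with
  | zero => intro begin h; exact absurd h (Nat.not_lt_zero _)
  | succ fuel IH =>
    intro begin hM sign s res hlen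
    rcases sign with _ | ⟨s0, _ | ⟨s1, _ | ⟨s2, _ | ⟨s3, rest⟩⟩⟩⟩
    · simp at hlen
    · simp at hlen
    · simp at hlen
    · simp at hlen
    have hav : (((s0 :: s1 :: s2 :: s3 :: rest).take 4).map (fun x => x == 0)) = [s0 == 0, s1 == 0, s2 == 0, s3 == 0] := rfl
    rw [hav]
    by_cases hb : begin = 0 ∨ begin = 2 ∨ begin = 4
    · -- recursive case over an operand position followed by an operator
      have hb7 : ¬ begin = 7 := by rcases hb with rfl | rfl | rfl <;> decide
      have hb6 : ¬ begin = 6 := by rcases hb with rfl | rfl | rfl <;> decide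
      have hch : (if begin + 2 = 0 ∨ begin + 2 = 2 ∨ begin + 2 = 4 ∨ begin + 2 = 6 then (7 - (begin + 2)).toNat else 0) < fuel := by
        rcases hb with rfl | rfl | rfl <;> (rw [if_pos (by decide)]; rw [if_pos (by decide)] at hM; omega)
      have H0 : ∀ (s' : String) (r : List String),
          runStack lt [(begin + 2, s', [false, s1 == 0, s2 == 0, s3 == 0])] r
            = generateF fuel lt (1 :: s1 :: s2 :: s3 :: rest) r (begin + 2) s' := by
        intro s' r
        rw [IH (begin + 2) hch (1 :: s1 :: s2 :: s3 :: rest) s' r (by simp only [List.length_cons]; omega)]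
        rfl
      have H1 : ∀ (s' : String) (r : List String),
          runStack lt [(begin + 2, s', [s0 == 0, false, s2 == 0, s3 == 0])] r
            = generateF fuel lt (s0 :: 1 :: s2 :: s3 :: rest) r (begin + 2) s' := by
        intro s' r
        rw [IH (begin + 2) hch (s0 :: 1 :: s2 :: s3 :: rest) s' r (by simp only [List.length_cons]; omega)]
        rfl
      have H2 : ∀ (s' : String) (r : List String),
          runStack lt [(begin + 2, s', [s0 == 0, s1 == 0, false, s3 == 0])] r
            = generateF fuel lt (s0 :: s1 :: 1 :: s3 :: rest) r (begin + 2) s' := by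
        intro s' r
        rw [IH (begin + 2) hch (s0 :: s1 :: 1 :: s3 :: rest) s' r (by simp only [List.length_cons]; omega)]
        rfl
      have H3 : ∀ (s' : String) (r : List String),
          runStack lt [(begin + 2, s', [s0 == 0, s1 == 0, s2 == 0, false])] r
            = generateF fuel lt (s0 :: s1 :: s2 :: 1 :: rest) r (begin + 2) s' := by
        intro s' r
        rw [IH (begin + 2) hch (s0 :: s1 :: s2 :: 1 :: rest) s' r (by simp only [List.length_cons]; omega)]
        rfl
      conv_lhs => rw [generateF]
      rw [runStack_step, List.append_nil, if_neg hb7,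
        childStates_024 lt begin hb s (s0 == 0) (s1 == 0) (s2 == 0) (s3 == 0)]
      rw [runStack_append, runStack_append, runStack_append, runStack_append, runStack_nil]
      simp only [runStack_ite, runStack_nil, runStack_cons2, H0, H1, H2, H3,
        pyGetD_cons4_0, pyGetD_cons4_1, pyGetD_cons4_2, pyGetD_cons4_3,
        if_pos hb, if_neg hb6, if_neg hb7, beq_iff_eq,
        List.set_cons_zero, List.set_cons_succ]
    · by_cases h6 : begin = 6
      · subst h6
        have hch : (if (6:Int) + 1 = 0 ∨ (6:Int) + 1 = 2 ∨ (6:Int) + 1 = 4 ∨ (6:Int) + 1 = 6 then (7 - ((6:Int) + 1)).toNat else 0) < fuel := by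
          rw [if_neg (by decide)]
          rw [if_pos (by decide)] at hM
          omega
        have H0 : ∀ (s' : String) (r : List String),
            runStack lt [((6:Int) + 1, s', [false, s1 == 0, s2 == 0, s3 == 0])] r
              = generateF fuel lt (1 :: s1 :: s2 :: s3 :: rest) r ((6:Int) + 1) s' := by
          intro s' r
          rw [IH ((6:Int) + 1) hch (1 :: s1 :: s2 :: s3 :: rest) s' r (by simp only [List.length_cons]; omega)]
          rfl
        have H1 : ∀ (s' : String) (r : List String),
            runStack lt [((6:Int) + 1, s', [s0 == 0, false, s2 == 0, s3 == 0])] r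
              = generateF fuel lt (s0 :: 1 :: s2 :: s3 :: rest) r ((6:Int) + 1) s' := by
          intro s' r
          rw [IH ((6:Int) + 1) hch (s0 :: 1 :: s2 :: s3 :: rest) s' r (by simp only [List.length_cons]; omega)]
          rfl
        have H2 : ∀ (s' : String) (r : List String),
            runStack lt [((6:Int) + 1, s', [s0 == 0, s1 == 0, false, s3 == 0])] r
              = generateF fuel lt (s0 :: s1 :: 1 :: s3 :: rest) r ((6:Int) + 1) s' := by
          intro s' r
          rw [IH ((6:Int) + 1) hch (s0 :: s1 :: 1 :: s3 :: rest) s' r (by simp only [List.length_cons]; omega)]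
          rfl
        have H3 : ∀ (s' : String) (r : List String),
            runStack lt [((6:Int) + 1, s', [s0 == 0, s1 == 0, s2 == 0, false])] r
              = generateF fuel lt (s0 :: s1 :: s2 :: 1 :: rest) r ((6:Int) + 1) s' := by
          intro s' r
          rw [IH ((6:Int) + 1) hch (s0 :: s1 :: s2 :: 1 :: rest) s' r (by simp only [List.length_cons]; omega)]
          rfl
        conv_lhs => rw [generateF]
        rw [runStack_step, List.append_nil, if_neg (by decide : ¬ (6:Int) = 7),
          childStates_6 lt s (s0 == 0) (s1 == 0) (s2 == 0) (s3 == 0)]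
        rw [runStack_append, runStack_append, runStack_append, runStack_append, runStack_nil]
        simp only [runStack_ite, runStack_nil, H0, H1, H2, H3,
          pyGetD_cons4_0, pyGetD_cons4_1, pyGetD_cons4_2, pyGetD_cons4_3,
          beq_iff_eq, eq_false hb, if_false, if_true, eq_self_iff_true,
          List.set_cons_zero, List.set_cons_succ]
      · -- leaf: no recursion on either side
        conv_lhs => rw [generateF]
        rw [runStack_step, List.append_nil, childStates_other lt begin hb h6 s _, runStack_nil]
        simp only [eq_false hb, eq_false h6, if_false, ite_self]

-- ===== VERDICT (by name: the statement is the Claim_ definition above) =====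
theorem generate_spec : Claim_equal_generate := by
  intro lt sign res begin s _ hpre
  unfold Spec_generate generate_alt generate
  rcases sign with _ | ⟨s0, _ | ⟨s1, _ | ⟨s2, _ | ⟨s3, rest⟩⟩⟩⟩
  · exact absurd hpre.1 (by simp)
  · exact absurd hpre.1 (by simp)
  · exact absurd hpre.1 (by simp)
  · exact absurd hpre.1 (by simp)
  · rw [avail_range4]
    have hlt : (if begin = 0 ∨ begin = 2 ∨ begin = 4 ∨ begin = 6 then (7 - begin).toNat else 0) < 8 := by
      split_ifs with h
      · rcases h with rfl | rfl | rfl | rfl <;> decide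
      · omega
    rw [main_eq lt 8 begin hlt (s0 :: s1 :: s2 :: s3 :: rest) s res (by simp only [List.length_cons]; omega)]
    rfl
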